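-- pv_equiv track=rewrite | github.com/dondon17/algorithm | samsung sw/level3/checklast4bit.py | solution
-- ===== SOURCE A (Python) =====
-- def solution(a, b):
--     if b == 0 or a < 1 or a > 30: return "OFF"
--
--     cnt = 0
--     while(b > 0):
--         if b%2 == 0:
--             break
--         elif b%2 == 1:
--             cnt += 1
--             if cnt == a: break
--         b//=2
--
--     if cnt==a: return "ON"
--     else: return "OFF"
-- ===== SOURCE B (Python) =====
-- def solution(a, b):
--     if b == 0 or a < 1 or a > 30: return "OFF"
--     m = 1 << a
--     return "ON" if b > 0 and b % m == m - 1 else "OFF"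
-- ===== Notes on version B (the rewrite author's own statement) =====
-- stated objective: simpler
-- what changed: Replaces the bit-by-bit trailing-ones counting loop with a single closed-form mask test: b is ON iff b > 0 and b % (1 << a) == (1 << a) - 1.
import Mathlib
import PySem

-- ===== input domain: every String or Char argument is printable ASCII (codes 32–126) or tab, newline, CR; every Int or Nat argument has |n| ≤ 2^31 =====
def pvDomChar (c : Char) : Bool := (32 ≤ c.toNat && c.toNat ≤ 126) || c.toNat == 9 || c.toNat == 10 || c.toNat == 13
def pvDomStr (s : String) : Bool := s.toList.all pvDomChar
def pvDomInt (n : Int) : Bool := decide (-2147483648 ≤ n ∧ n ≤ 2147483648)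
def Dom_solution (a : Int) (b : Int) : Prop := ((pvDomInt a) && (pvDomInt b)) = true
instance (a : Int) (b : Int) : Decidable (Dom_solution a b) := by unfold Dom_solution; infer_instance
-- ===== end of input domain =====

-- B replaces A's bit-by-bit trailing-ones counting loop with one closed-form mask test (simpler).

-- ===== PORT A =====
-- the while loop: state (b, cnt); breaks on an even low bit or when cnt reaches a, else b //= 2
def solutionLoop (a : Int) (b : Int) (cnt : Int) : Int :=
  if h : 0 < b then
    if PySem.Int.mod b 2 = 0 then cnt
    else if PySem.Int.mod b 2 = 1 then
      if cnt + 1 = a then cnt + 1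
      else solutionLoop a (PySem.Int.floordiv b 2) (cnt + 1)
    else solutionLoop a (PySem.Int.floordiv b 2) cnt
  else cnt
termination_by b.toNat
decreasing_by
  all_goals
    have h2 : PySem.Int.floordiv b 2 = b / 2 := PySem.Int.floordiv_eq_ediv_of_pos (by omega)
    rw [h2]; omega

def solution (a : Int) (b : Int) : String :=
  if b = 0 ∨ a < 1 ∨ a > 30 then "OFF"
  else if solutionLoop a b 0 = a then "ON" else "OFF"

-- ===== PORT B =====
def solution_alt (a : Int) (b : Int) : String :=
  if b = 0 ∨ a < 1 ∨ a > 30 then "OFF"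
  else
    let m : Int := (1 : Int) <<< a.toNat
    if 0 < b ∧ PySem.Int.mod b m = m - 1 then "ON" else "OFF"

-- ===== PRECONDITION & SPEC =====
def Spec_solution (a : Int) (b : Int) (out : String) : Prop := out = solution_alt a b
instance (a : Int) (b : Int) (out : String) : Decidable (Spec_solution a b out) := by unfold Spec_solution; infer_instance

-- ===== CLAIM (what is proved, stated in full; the proofs are below) =====
def Claim_equal_solution : Prop := ∀ (a : Int) (b : Int), Dom_solution a b → Spec_solution a b (solution a b)

-- ===== LEMMAS AND PROOFS =====

-- remainder of b by 2*M, read off from the low bit and the remainder of b/2 by M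
theorem emod_double (M : Int) (hM : 0 < M) (b : Int) :
    b % (2 * M) = 2 * ((b / 2) % M) + b % 2 := by
  have h1 : M * (b / 2 / M) + (b / 2) % M = b / 2 := Int.mul_ediv_add_emod (b / 2) M
  have hr0 : 0 ≤ (b / 2) % M := Int.emod_nonneg _ (by omega)
  have hr1 : (b / 2) % M < M := Int.emod_lt_of_pos _ hM
  have h2 : b = (2 * ((b / 2) % M) + b % 2) + (2 * M) * (b / 2 / M) := by
    have h3 : b = 2 * (b / 2) + b % 2 := by omega
    linear_combination h3 - 2 * h1
  calc b % (2 * M) = ((2 * ((b / 2) % M) + b % 2) + (2 * M) * (b / 2 / M)) % (2 * M) := by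
        rw [← h2]
    _ = (2 * ((b / 2) % M) + b % 2) % (2 * M) := by rw [Int.add_mul_emod_self_left]
    _ = 2 * ((b / 2) % M) + b % 2 := Int.emod_eq_of_lt (by omega) (by omega)

-- Loop invariant: for 0 ≤ b and cnt < a, the loop reaches a iff the low (a - cnt) bits of b are all 1
theorem solutionLoop_eq_iff (n : Nat) (b : Int) (hn : b.toNat ≤ n) (hb : 0 ≤ b)
    (a cnt : Int) (hc : cnt < a) :
    (solutionLoop a b cnt = a ↔ b % 2 ^ (a - cnt).toNat = 2 ^ (a - cnt).toNat - 1) := by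
  induction n generalizing b cnt with
  | zero =>
    have hb0 : b = 0 := by omega
    rw [solutionLoop]
    have h2k : (2:Int) ^ 1 ≤ 2 ^ (a - cnt).toNat := pow_le_pow_right₀ one_le_two (by omega)
    simp only [hb0]
    norm_num
    omega
  | succ n ih =>
    by_cases hb0 : b = 0
    · rw [solutionLoop]
      have h2k : (2:Int) ^ 1 ≤ 2 ^ (a - cnt).toNat := pow_le_pow_right₀ one_le_two (by omega)
      simp only [hb0]
      norm_num
      omega
    · have hbpos : 0 < b := by omega
      have hmod2 : PySem.Int.mod b 2 = b % 2 := PySem.Int.mod_eq_emod_of_pos (by omega)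
      have hdiv2 : PySem.Int.floordiv b 2 = b / 2 := PySem.Int.floordiv_eq_ediv_of_pos (by omega)
      have hMpos : (0:Int) < 2 ^ ((a - cnt).toNat - 1) := by positivity
      have hsplit : (2:Int) ^ (a - cnt).toNat = 2 * 2 ^ ((a - cnt).toNat - 1) := by
        rw [← pow_succ']
        congr 1
        omega
      have hmodsplit : b % (2 ^ (a - cnt).toNat) =
          2 * ((b / 2) % 2 ^ ((a - cnt).toNat - 1)) + b % 2 := by
        rw [hsplit]; exact emod_double _ hMpos b
      have hr0 : 0 ≤ (b / 2) % 2 ^ ((a - cnt).toNat - 1) := Int.emod_nonneg _ (by omega)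
      have hr1 : (b / 2) % 2 ^ ((a - cnt).toNat - 1) < 2 ^ ((a - cnt).toNat - 1) :=
        Int.emod_lt_of_pos _ hMpos
      rw [solutionLoop, dif_pos hbpos, hmod2, hdiv2]
      by_cases he : b % 2 = 0
      · rw [if_pos he]
        rw [hmodsplit, hsplit]
        omega
      · have ho : b % 2 = 1 := by omega
        rw [if_neg he, if_pos ho]
        by_cases hlast : cnt + 1 = a
        · rw [if_pos hlast]
          have hk0 : (a - cnt).toNat - 1 = 0 := by omega
          rw [hk0, pow_zero] at hmodsplit hr0 hr1 hsplit
          rw [hmodsplit, hsplit]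
          omega
        · rw [if_neg hlast]
          have hdn : (b / 2).toNat ≤ n := by omega
          have hih := ih (b / 2) hdn (by omega) (cnt + 1) (by omega)
          have hk : (a - (cnt + 1)).toNat = (a - cnt).toNat - 1 := by omega
          rw [hk] at hih
          rw [hih, hmodsplit, hsplit]
          omega

-- ===== VERDICT (by name: the statement is the Claim_ definition above) =====
theorem solution_spec : Claim_equal_solution := by
  intro a b _
  unfold Spec_solution solution solution_alt
  by_cases hg : b = 0 ∨ a < 1 ∨ a > 30
  · rw [if_pos hg, if_pos hg]
  · rw [if_neg hg, if_neg hg]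
    have hb0 : b ≠ 0 := fun h => hg (Or.inl h)
    have ha1 : 1 ≤ a := by by_contra h; exact hg (Or.inr (Or.inl (by omega)))
    have ha30 : a ≤ 30 := by by_contra h; exact hg (Or.inr (Or.inr (by omega)))
    have hm : (1 : Int) <<< a.toNat = 2 ^ a.toNat := by rw [Int.shiftLeft_eq]; ring
    have hmp : (0:Int) < 2 ^ a.toNat := by positivity
    rw [hm]
    show _ = if 0 < b ∧ PySem.Int.mod b (2 ^ a.toNat) = 2 ^ a.toNat - 1 then "ON" else "OFF"
    rw [PySem.Int.mod_eq_emod_of_pos hmp]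
    by_cases hbpos : 0 < b
    · have hiff := solutionLoop_eq_iff b.toNat b le_rfl (by omega) a 0 (by omega)
      have ha0 : (a - 0).toNat = a.toNat := by omega
      rw [ha0] at hiff
      by_cases hcond : b % 2 ^ a.toNat = 2 ^ a.toNat - 1
      · rw [if_pos (hiff.mpr hcond), if_pos ⟨hbpos, hcond⟩]
      · rw [if_neg (fun h => hcond (hiff.mp h)), if_neg (fun h => hcond h.2)]
    · have hneg : solutionLoop a b 0 = 0 := by rw [solutionLoop, dif_neg hbpos]
      rw [if_neg (by rw [hneg]; omega), if_neg (fun h => hbpos h.1)]
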